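-- pv_equiv track=rewrite | github.com/DooDuZ/sparta_python | hanghae/day11/prob5.py | solution
-- ===== SOURCE A (Python) =====
-- def solution(word):
--     # 과정 중 중복 단어가 나올 수 있으므로 set
--     word_set = set()
--
--     # slice 위치 정보를 바탕으로 단어 가공
--     def get_reverse_word(idx_list):
--         first, second = idx_list
--
--         ret = (
--             word[: first + 1][::-1]
--             + word[first + 1 : second + 1][::-1]
--             + word[second + 1 :][::-1]
--         )
--
--         return ret
--
--     def dfs(depth, start, idx_list):
--         # 자르는 지점 2개를 골랐다면 멈춰준다
--         if depth == 2:
--             word_set.add(get_reverse_word(idx_list))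
--             return
--
--         # 시작 인덱스부터 최소한의 길이를 남길 때 까지 순회
--         for i in range(start, len(word) - (2 - depth)):
--             # 자르는 지점을 배열에 저장하고 넘겨준다
--             idx_list[depth] = i
--             dfs(depth + 1, i + 1, idx_list)
--
--     dfs(0, 0, [-1, -1])
--
--     return sorted(list(word_set))[0]
-- ===== SOURCE B (Python) =====
-- def solution(word):
--     # Flat nested loops with a running minimum: no recursion, no set, no sort.
--     n = len(word)
--     best = None
--     for i in range(n - 2):
--         for j in range(i + 1, n - 1):
--             cand = word[: i + 1][::-1] + word[i + 1 : j + 1][::-1] + word[j + 1 :][::-1]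
--             if best is None or cand < best:
--                 best = cand
--     return best
-- ===== Notes on version B (the rewrite author's own statement) =====
-- stated objective: simpler
-- what changed: Replaces the depth-2 dfs recursion with mutated index-list state, the intermediate set and the final sort by two flat nested loops that keep a running minimum candidate (no set, no sort).
import Mathlib
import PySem

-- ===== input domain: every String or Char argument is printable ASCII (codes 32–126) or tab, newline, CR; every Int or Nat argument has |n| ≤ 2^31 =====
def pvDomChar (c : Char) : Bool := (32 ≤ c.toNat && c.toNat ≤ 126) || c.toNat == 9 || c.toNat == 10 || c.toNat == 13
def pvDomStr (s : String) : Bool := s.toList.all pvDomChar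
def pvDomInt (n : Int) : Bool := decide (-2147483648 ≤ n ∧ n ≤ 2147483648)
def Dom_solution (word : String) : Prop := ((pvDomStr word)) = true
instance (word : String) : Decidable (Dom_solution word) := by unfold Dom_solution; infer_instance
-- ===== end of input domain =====

-- B replaces A's depth-2 dfs recursion + set + sort by two flat nested loops keeping a running minimum (simpler; no speed claim).


-- ===== PORT A =====
-- get_reverse_word: unpacks idx_list into (first, second); '[::-1]' is reverse (PySem.List.slice?_none_none_neg_one)
def getReverseWordA (w : List Char) (idxList : List Int) : List Char :=
  match idxList with
  | first :: second :: _ =>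
      (PySem.List.slice w none (some (first + 1))).reverse
        ++ (PySem.List.slice w (some (first + 1)) (some (second + 1))).reverse
        ++ (PySem.List.slice w (some (second + 1)) none).reverse
  | _ => []   -- unreachable: dfs always passes a 2-element list (Python would raise on unpack)

-- dfs(depth, start, idx_list): structural recursion on rem = 2 - depth; 'idx_list[depth] = i' is pySetD
def dfsA (w : List Char) : Nat → Int → List Int → PySem.Set (List Char) → PySem.Set (List Char)
  | 0, _, idxList, s => PySem.Set.add s (getReverseWordA w idxList)
  | rem + 1, start, idxList, s =>
      (PySem.List.pyRange start ((w.length : Int) - ((rem : Int) + 1)) 1).foldl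
        (fun s i => dfsA w rem (i + 1) (PySem.List.pySetD idxList (2 - ((rem : Int) + 1)) i) s) s

def solution (word : String) : String :=
  let w := word.toList
  let wordSet := dfsA w 2 0 [-1, -1] PySem.Set.empty
  match PySem.List.sorted wordSet (fun x => x) false with
  | [] => ""          -- Python raises IndexError here (sorted(...)[0] on empty); excluded by Pre_
  | h :: _ => String.ofList h

-- ===== PORT B =====
def solution_alt (word : String) : String :=
  let w := word.toList
  let n : Int := w.length
  let best :=
    (PySem.List.pyRange 0 (n - 2) 1).foldl (fun b i =>
      (PySem.List.pyRange (i + 1) (n - 1) 1).foldl (fun b j =>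
        let cand := (PySem.List.slice w none (some (i + 1))).reverse
          ++ (PySem.List.slice w (some (i + 1)) (some (j + 1))).reverse
          ++ (PySem.List.slice w (some (j + 1)) none).reverse
        match b with
        | none => some cand
        | some x => if cand < x then some cand else some x) b) (none : Option (List Char))
  match best with
  | none => ""        -- Python returns None here; excluded by Pre_
  | some x => String.ofList x

-- ===== PRECONDITION & SPEC =====
-- Pre_ excludes words shorter than 3 characters: there A's candidate set is empty, so sorted(...)[0] raises IndexError.
def Pre_solution (word : String) : Prop := 3 ≤ word.toList.length
instance (word : String) : Decidable (Pre_solution word) := by unfold Pre_solution; infer_instance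
def pvWitness_solution : String := "abcd"

def Spec_solution (word : String) (out : String) : Prop := out = solution_alt word
instance (word : String) (out : String) : Decidable (Spec_solution word out) := by unfold Spec_solution; infer_instance

-- ===== CLAIM (what is proved, stated in full; the proofs are below) =====
def Claim_equal_solution : Prop :=
  ∀ (word : String), Dom_solution word → Pre_solution word → Spec_solution word (solution word)

-- ===== LEMMAS AND PROOFS =====

-- the shared candidate for cut points (i, j)
def candAt (w : List Char) (i j : Int) : List Char :=
  (PySem.List.slice w none (some (i + 1))).reverse
    ++ (PySem.List.slice w (some (i + 1)) (some (j + 1))).reverse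
    ++ (PySem.List.slice w (some (j + 1)) none).reverse

-- the list of all candidates, in the traversal order both programs use
def cands (w : List Char) : List (List Char) :=
  (PySem.List.pyRange 0 ((w.length : Int) - 2) 1).flatMap (fun i =>
    (PySem.List.pyRange (i + 1) ((w.length : Int) - 1) 1).map (fun j => candAt w i j))

-- a nested fold over (i, j) is a flat fold over the flatMap of candidates
theorem foldl_nested_eq_flatMap {β : Type} (outer : List Int) (inner : Int → List Int)
    (f : Int → Int → List Char) (g : β → List Char → β) (b : β) :
    outer.foldl (fun b i => (inner i).foldl (fun b j => g b (f i j)) b) b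
      = (outer.flatMap (fun i => (inner i).map (f i))).foldl g b := by
  induction outer generalizing b with
  | nil => rfl
  | cons x xs ih => simp [List.flatMap_cons, List.foldl_append, List.foldl_map, ih]

-- the min-keeping step B uses
def minStep (b : Option (List Char)) (c : List Char) : Option (List Char) :=
  match b with
  | none => some c
  | some x => if c < x then some c else some x

-- the fold of minStep yields a least element of the accumulator-plus-list
theorem minStep_foldl_spec (L : List (List Char)) (x : List Char) :
    ∃ m, L.foldl minStep (some x) = some m ∧ m ∈ x :: L ∧ ∀ y ∈ x :: L, m ≤ y := by
  induction L generalizing x with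
  | nil => exact ⟨x, rfl, by simp, by simp⟩
  | cons c cs ih =>
    simp only [List.foldl_cons]
    by_cases h : c < x
    · obtain ⟨m, hm, hmem, hle⟩ := ih c
      refine ⟨m, by simpa [minStep, h] using hm, ?_, ?_⟩
      · rcases List.mem_cons.mp hmem with h1 | h1
        · simp [h1]
        · simp [h1]
      · intro y hy
        rcases List.mem_cons.mp hy with h1 | h1
        · subst h1
          exact le_trans (hle c (List.mem_cons_self ..)) (le_of_lt h)
        · exact hle y h1
    · obtain ⟨m, hm, hmem, hle⟩ := ih x
      refine ⟨m, by simpa [minStep, h] using hm, ?_, ?_⟩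
      · rcases List.mem_cons.mp hmem with h1 | h1
        · simp [h1]
        · simp [h1]
      · intro y hy
        rcases List.mem_cons.mp hy with h1 | h1
        · exact hle y (by simp [h1])
        · rcases List.mem_cons.mp h1 with h2 | h2
          · subst h2
            exact le_trans (hle x (List.mem_cons_self ..)) (not_lt.mp h)
          · exact hle y (by simp [h2])

-- finishing steps of the two programs, named so congrArg applies
def sortHeadFin (s : PySem.Set (List Char)) : String :=
  match PySem.List.sorted s (fun x => x) false with
  | [] => ""
  | h :: _ => String.ofList h

def finalize (o : Option (List Char)) : String :=
  match o with
  | none => ""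
  | some x => String.ofList x

-- A's set fold = Set.ofList of the candidate list
theorem dfsA_eq_ofList (w : List Char) :
    dfsA w 2 0 [-1, -1] PySem.Set.empty = PySem.Set.ofList (cands w) := by
  calc dfsA w 2 0 [-1, -1] PySem.Set.empty
      = (PySem.List.pyRange 0 ((w.length : Int) - 2) 1).foldl (fun s i =>
          (PySem.List.pyRange (i + 1) ((w.length : Int) - 1) 1).foldl
            (fun s j => PySem.Set.add s (candAt w i j)) s) ([] : PySem.Set (List Char)) := rfl
    _ = (cands w).foldl PySem.Set.add ([] : PySem.Set (List Char)) :=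
        foldl_nested_eq_flatMap _ _ (candAt w) PySem.Set.add _
    _ = PySem.Set.ofList (cands w) := rfl

theorem a_eq (word : String) :
    solution word = sortHeadFin (PySem.Set.ofList (cands word.toList)) :=
  congrArg sortHeadFin (dfsA_eq_ofList word.toList)

-- B's nested fold = flat min fold over the candidate list
theorem alt_eq (word : String) :
    solution_alt word = finalize ((cands word.toList).foldl minStep none) :=
  congrArg finalize
    (foldl_nested_eq_flatMap _ _ (candAt word.toList) minStep (none : Option (List Char)))

-- head of sorted(set(L)) = fold-min of L, for nonempty L
theorem head_sorted_ofList_eq_min (L : List (List Char)) (hL : L ≠ []) :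
    sortHeadFin (PySem.Set.ofList L) = finalize (L.foldl minStep none) := by
  obtain ⟨c, cs, rfl⟩ := List.exists_cons_of_ne_nil hL
  obtain ⟨m, hm, hmem, hle⟩ := minStep_foldl_spec cs c
  have hfold : (c :: cs).foldl minStep none = some m := by
    simpa [minStep] using hm
  have hSnil : PySem.List.sorted (PySem.Set.ofList (c :: cs)) (fun x => x) false ≠ [] := by
    intro hcontra
    have : PySem.Set.ofList (c :: cs) = [] := (PySem.List.sorted_eq_nil_iff _ _ _).mp hcontra
    have hc : c ∈ PySem.Set.ofList (c :: cs) := (PySem.Set.mem_ofList _ _).mpr (by simp)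
    simp [this] at hc
  obtain ⟨h, t, hS⟩ := List.exists_cons_of_ne_nil hSnil
  have hS' : @PySem.List.sorted (List Char) (List Char) LinearOrder.toPartialOrder.toLT
      LinearOrder.toDecidableLT (PySem.Set.ofList (c :: cs)) (fun x => x) false = h :: t := by
    rw [← hS]; congr 1
  have hhead : ∀ y ∈ PySem.Set.ofList (c :: cs), h ≤ y :=
    fun y hy => PySem.List.key_head_sorted_le (PySem.Set.ofList (c :: cs)) (fun x : List Char => x) hS' y hy
  have hhmem : h ∈ (c :: cs) := by
    have : h ∈ PySem.List.sorted (PySem.Set.ofList (c :: cs)) (fun x => x) false := by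
      simp [hS]
    exact (PySem.Set.mem_ofList _ _).mp ((PySem.List.mem_sorted _ _ _ _).mp this)
  have hmh : m ≤ h := hle h hhmem
  have hhm : h ≤ m := hhead m ((PySem.Set.mem_ofList _ _).mpr hmem)
  have : h = m := le_antisymm hhm hmh
  simp [sortHeadFin, finalize, hS, hfold, this]

theorem cands_nonempty (w : List Char) (h : 3 ≤ w.length) : cands w ≠ [] := by
  have hmem : candAt w 0 1 ∈ cands w := by
    unfold cands
    rw [List.mem_flatMap]
    refine ⟨0, ?_, ?_⟩
    · rw [PySem.List.mem_pyRange_one]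
      omega
    · rw [List.mem_map]
      exact ⟨1, by rw [PySem.List.mem_pyRange_one]; omega, rfl⟩
  intro hcontra
  rw [hcontra] at hmem
  exact List.not_mem_nil hmem

-- ===== VERDICT (by name: the statement is the Claim_ definition above) =====
theorem solution_spec : Claim_equal_solution := by
  intro word _ hpre
  unfold Spec_solution
  rw [a_eq, alt_eq]
  exact head_sorted_ofList_eq_min _ (cands_nonempty _ hpre)
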